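-- pv_equiv track=rewrite | github.com/plkumjorn/FIND | find/models.py | get_kernel_index
-- ===== SOURCE A (Python) =====
-- def num_all_filters(filter_list):
--     """
--     Example input: [(10, 2), (10, 3), (10, 4)]
--     Example output: 30
--     """
--     return sum([t[0] for t in filter_list])
--
-- def get_kernel_index(filter_idx, filter_list):
--     """
--     Input: a filter_idx
--     Output: the corresponding kernel index (layer index) and the offset (the position in the layer)
--     """
--     if filter_idx < 0 or filter_idx >= num_all_filters(filter_list):
--         assert False, f"Invalid filter index {filter_idx} -- Only filter indices in the range [0, {num_all_filters(filter_list)-1}] are valid."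
--
--     kernel_idx = -1
--     max_filter_idx = -1
--     for t in filter_list:
--         kernel_idx += 1
--         if filter_idx <= max_filter_idx + t[0]:
--             ans = (kernel_idx, filter_idx - max_filter_idx - 1)
--             return ans
--         max_filter_idx += t[0]
-- ===== SOURCE B (Python) =====
-- def num_all_filters(filter_list):
--     return sum([t[0] for t in filter_list])
--
-- def get_kernel_index(filter_idx, filter_list):
--     total = num_all_filters(filter_list)
--     if filter_idx < 0 or filter_idx >= total:
--         assert False, f"Invalid filter index {filter_idx} -- Only filter indices in the range [0, {total-1}] are valid."
--     prefix = [0]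
--     for t in filter_list:
--         prefix.append(prefix[-1] + t[0])
--     i = 0
--     while prefix[i + 1] <= filter_idx:
--         i += 1
--     return (i, filter_idx - prefix[i])
-- ===== Notes on version B (the rewrite author's own statement) =====
-- stated objective: alternative
-- what changed: B precomputes the cumulative prefix-sum list of per-layer filter counts once and then scans for the first prefix total exceeding filter_idx, instead of A's single loop that maintains kernel_idx and max_filter_idx state with an early return; the offset is filter_idx minus the preceding prefix total.
import Mathlib
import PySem

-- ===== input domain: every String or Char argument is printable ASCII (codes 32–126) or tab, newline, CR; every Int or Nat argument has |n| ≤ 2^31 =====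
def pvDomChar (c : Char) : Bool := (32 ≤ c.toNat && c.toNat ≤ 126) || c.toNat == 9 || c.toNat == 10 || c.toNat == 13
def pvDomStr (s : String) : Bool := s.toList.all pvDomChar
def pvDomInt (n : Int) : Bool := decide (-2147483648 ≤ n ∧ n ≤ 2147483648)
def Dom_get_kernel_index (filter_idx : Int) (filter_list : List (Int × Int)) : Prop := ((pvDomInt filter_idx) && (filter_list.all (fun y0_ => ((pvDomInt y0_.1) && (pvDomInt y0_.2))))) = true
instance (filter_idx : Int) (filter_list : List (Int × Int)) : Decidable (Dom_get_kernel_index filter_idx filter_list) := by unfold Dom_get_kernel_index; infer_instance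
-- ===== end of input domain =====

-- B replaces A's stateful loop by a prefix-sum list plus a first-exceeding scan (alternative decomposition, same cost); equivalence is about the return value on valid indices.
-- ===== PORT A =====
-- A's for-loop: state = (kernel_idx, max_filter_idx); falling off the loop returns None in Python
-- (unreachable under Pre_), transliterated here as the junk value (0, 0).
def gkiLoopA (filter_idx : Int) : List (Int × Int) → Int → Int → Int × Int
  | [], _, _ => (0, 0)
  | t :: rest, kernel_idx, max_filter_idx =>
    let k := kernel_idx + 1
    if filter_idx ≤ max_filter_idx + t.1 then (k, filter_idx - max_filter_idx - 1)
    else gkiLoopA filter_idx rest k (max_filter_idx + t.1)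

def get_kernel_index (filter_idx : Int) (filter_list : List (Int × Int)) : Int × Int :=
  gkiLoopA filter_idx filter_list (-1) (-1)

-- ===== PORT B =====
-- Source B's `prefix` list without its leading 0: cumulative sums starting from acc.
def gkiPrefix : List (Int × Int) → Int → List Int
  | [], _ => []
  | t :: rest, acc => (acc + t.1) :: gkiPrefix rest (acc + t.1)

-- Source B's while loop: advance i while prefix[i+1] ≤ filter_idx; prev = prefix[i].
-- (Python raises IndexError when the list is exhausted — unreachable under Pre_; junk result here.)
def gkiWalk (filter_idx : Int) : Int → List Int → Int → Int × Int
  | prev, [], i => (i, filter_idx - prev)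
  | prev, nxt :: rest, i =>
    if nxt ≤ filter_idx then gkiWalk filter_idx nxt rest (i + 1)
    else (i, filter_idx - prev)

def get_kernel_index_alt (filter_idx : Int) (filter_list : List (Int × Int)) : Int × Int :=
  gkiWalk filter_idx 0 (gkiPrefix filter_list 0) 0

-- ===== PRECONDITION & SPEC =====
-- A asserts (AssertionError) unless 0 ≤ filter_idx < total number of filters.
def Pre_get_kernel_index (filter_idx : Int) (filter_list : List (Int × Int)) : Prop :=
  0 ≤ filter_idx ∧ filter_idx < (filter_list.map (fun t => t.1)).sum
instance (filter_idx : Int) (filter_list : List (Int × Int)) : Decidable (Pre_get_kernel_index filter_idx filter_list) := by unfold Pre_get_kernel_index; infer_instance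
def pvWitness_get_kernel_index : Int × (List (Int × Int)) := (1, [(1, 1), (2, 3)])

def Spec_get_kernel_index (filter_idx : Int) (filter_list : List (Int × Int)) (out : Int × Int) : Prop := out = get_kernel_index_alt filter_idx filter_list
instance (filter_idx : Int) (filter_list : List (Int × Int)) (out : Int × Int) : Decidable (Spec_get_kernel_index filter_idx filter_list out) := by unfold Spec_get_kernel_index; infer_instance

-- ===== CLAIM (what is proved, stated in full; the proofs are below) =====
def Claim_equal_get_kernel_index : Prop := ∀ (filter_idx : Int) (filter_list : List (Int × Int)), Dom_get_kernel_index filter_idx filter_list → Pre_get_kernel_index filter_idx filter_list → Spec_get_kernel_index filter_idx filter_list (get_kernel_index filter_idx filter_list)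

-- ===== LEMMAS AND PROOFS =====
-- Invariant: A's max_filter_idx is (cumulative sum) - 1 and kernel_idx is i - 1,
-- where acc is the cumulative sum of the consumed layers and i the number consumed.
lemma gki_walk_eq (filter_idx : Int) : ∀ (l : List (Int × Int)) (acc i : Int),
    acc ≤ filter_idx → filter_idx < acc + (l.map (fun t => t.1)).sum →
    gkiLoopA filter_idx l (i - 1) (acc - 1) = gkiWalk filter_idx acc (gkiPrefix l acc) i := by
  intro l
  induction l with
  | nil => intro acc i h1 h2; simp at h2; omega
  | cons t rest ih =>
    intro acc i h1 h2
    simp only [gkiLoopA, gkiPrefix, gkiWalk]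
    by_cases hc : acc + t.1 ≤ filter_idx
    · have hA : ¬ filter_idx ≤ acc - 1 + t.1 := by omega
      rw [if_neg hA, if_pos hc]
      have := ih (acc + t.1) (i + 1) hc (by simp at h2 ⊢; omega)
      have he1 : (i - 1) + 1 = (i + 1) - 1 := by omega
      have he2 : acc - 1 + t.1 = (acc + t.1) - 1 := by omega
      rw [he1, he2, this]
    · have hA : filter_idx ≤ acc - 1 + t.1 := by omega
      rw [if_pos hA, if_neg hc]
      simp only [Prod.mk.injEq]
      constructor <;> omega

-- ===== VERDICT (by name: the statement is the Claim_ definition above) =====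
theorem get_kernel_index_spec : Claim_equal_get_kernel_index := by
  intro filter_idx filter_list _ hpre
  unfold Spec_get_kernel_index get_kernel_index get_kernel_index_alt
  have := gki_walk_eq filter_idx filter_list 0 0 hpre.1 (by simpa using hpre.2)
  simpa using this
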